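-- pv_equiv track=rewrite | github.com/rjpower/portkit | portkit/tools/patch/lib.py | _parse_diff_block
-- ===== SOURCE A (Python) =====
-- def _parse_diff_block(
--     lines: list[str], start_idx: int
-- ) -> tuple[list[str], list[str], int]:
--     """Parse a single diff block starting from <<<<<<< SEARCH."""
--     search_lines = []
--     replace_lines = []
--     i = start_idx + 1  # Skip <<<<<<< SEARCH
--
--     # Collect search lines until =======
--     while i < len(lines) and lines[i] != "=======":
--         search_lines.append(lines[i])
--         i += 1
--
--     if i >= len(lines):
--         raise ValueError("Invalid patch format: missing =======")
--
--     i += 1  # Skip =======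
--
--     # Collect replace lines until >>>>>>> REPLACE
--     while i < len(lines) and lines[i] != ">>>>>>> REPLACE":
--         replace_lines.append(lines[i])
--         i += 1
--
--     if i >= len(lines):
--         raise ValueError("Invalid patch format: missing >>>>>>> REPLACE")
--
--     return search_lines, replace_lines, i
-- ===== SOURCE B (Python) =====
-- def _parse_diff_block(
--     lines: list[str], start_idx: int
-- ) -> tuple[list[str], list[str], int]:
--     """Parse a single diff block starting from <<<<<<< SEARCH."""
--     sections = {False: [], True: []}  # False: search section, True: replace section
--     in_replace = False
--     i = start_idx + 1  # Skip <<<<<<< SEARCH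
--     while i < len(lines):
--         line = lines[i]
--         if not in_replace and line == "=======":
--             in_replace = True
--         elif in_replace and line == ">>>>>>> REPLACE":
--             return sections[False], sections[True], i
--         else:
--             sections[in_replace].append(line)
--         i += 1
--     if not in_replace:
--         raise ValueError("Invalid patch format: missing =======")
--     raise ValueError("Invalid patch format: missing >>>>>>> REPLACE")
-- ===== Notes on version B (the rewrite author's own statement) =====
-- stated objective: alternative
-- what changed: Replaces A's two sequential while-loops with trailing error checks by a single pass that carries a search/replace phase flag, collects into a phase-keyed dict of sections and returns from inside the loop.
import Mathlib
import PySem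

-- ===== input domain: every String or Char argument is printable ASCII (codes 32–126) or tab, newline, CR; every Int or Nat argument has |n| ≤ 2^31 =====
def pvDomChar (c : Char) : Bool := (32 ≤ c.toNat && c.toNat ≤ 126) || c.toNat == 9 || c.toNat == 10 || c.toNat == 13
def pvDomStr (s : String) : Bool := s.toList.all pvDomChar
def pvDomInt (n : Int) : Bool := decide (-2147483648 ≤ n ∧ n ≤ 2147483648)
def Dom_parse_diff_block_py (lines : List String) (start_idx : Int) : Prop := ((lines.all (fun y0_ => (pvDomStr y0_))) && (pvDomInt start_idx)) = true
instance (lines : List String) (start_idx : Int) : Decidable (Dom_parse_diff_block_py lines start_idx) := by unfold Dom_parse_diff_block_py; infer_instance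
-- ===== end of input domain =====

-- B replaces A's two sequential while-loops (and their trailing error checks) by a single pass with a
-- phase flag that returns from inside the loop; same cost, a different decomposition of the scan.

-- ===== PORT A =====
-- 'while i < len(lines) and lines[i] != stop: acc.append(lines[i]); i += 1' — some (acc, i) at exit;
-- none = Python IndexError from lines[i] (negative index below -len).  lines[i] is pyGet? (wraps when negative).
def pvScanUntil? (lines : List String) (stop : String) (i : Int) (acc : List String) :
    Option (List String × Int) :=
  if _h : i < (lines.length : Int) then
    match PySem.List.pyGet? lines i with
    | none => none
    | some v =>
      if v = stop then some (acc, i)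
      else pvScanUntil? lines stop (i + 1) (acc ++ [v])
  else some (acc, i)
termination_by ((lines.length : Int) - i).toNat
decreasing_by omega

def parse_diff_block_py (lines : List String) (start_idx : Int) : List String × List String × Int :=
  match pvScanUntil? lines "=======" (start_idx + 1) [] with
  | none => ([], [], 0)  -- Python: IndexError propagates
  | some (search_lines, i) =>
    if (lines.length : Int) ≤ i then ([], [], 0)  -- Python: raise ValueError "missing ======="
    else
      match pvScanUntil? lines ">>>>>>> REPLACE" (i + 1) [] with
      | none => ([], [], 0)  -- Python: IndexError propagates
      | some (replace_lines, j) =>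
        if (lines.length : Int) ≤ j then ([], [], 0)  -- Python: raise ValueError "missing >>>>>>> REPLACE"
        else (search_lines, replace_lines, j)

-- ===== PORT B =====
-- Source B's single while-loop; the dict sections[False]/sections[True] is carried as the two
-- accumulators accS/accR (fixed Bool keys), in_replace is the phase flag; returns from inside the loop.
def pvLoopB (lines : List String) (i : Int) (accS accR : List String) (inRep : Bool) :
    List String × List String × Int :=
  if _h : i < (lines.length : Int) then
    match PySem.List.pyGet? lines i with
    | none => ([], [], 0)  -- Python: IndexError propagates
    | some line =>
      if inRep = false ∧ line = "=======" then pvLoopB lines (i + 1) accS accR true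
      else if inRep = true ∧ line = ">>>>>>> REPLACE" then (accS, accR, i)
      else if inRep then pvLoopB lines (i + 1) accS (accR ++ [line]) inRep
      else pvLoopB lines (i + 1) (accS ++ [line]) accR inRep
  else ([], [], 0)  -- Python: raise ValueError (missing ======= / missing >>>>>>> REPLACE)
termination_by ((lines.length : Int) - i).toNat
decreasing_by all_goals omega

def parse_diff_block_py_alt (lines : List String) (start_idx : Int) : List String × List String × Int :=
  pvLoopB lines (start_idx + 1) [] [] false

-- ===== PRECONDITION & SPEC =====
-- The wrapped suffix Python's scan 'lines[i]' for i = s, s+1, … visits: for a negative start it reads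
-- from position len+s and, past -1, wraps to the front of the list.
def pvScanView (lines : List String) (s : Int) : List String :=
  if 0 ≤ s then lines.drop s.toNat else lines.drop (lines.length + s).toNat ++ lines

-- Pre_ is exactly the condition under which the Python A returns normally: the first read index is not
-- below -len(lines) (no IndexError), a '=======' occurs in the scanned sequence, and a '>>>>>>> REPLACE'
-- occurs after the first '======='; on all other inputs A raises (IndexError or ValueError).
def Pre_parse_diff_block_py (lines : List String) (start_idx : Int) : Prop :=
  -(lines.length : Int) ≤ start_idx + 1 ∧
  "=======" ∈ pvScanView lines (start_idx + 1) ∧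
  ">>>>>>> REPLACE" ∈
    (pvScanView lines (start_idx + 1)).drop
      ((pvScanView lines (start_idx + 1)).idxOf "=======" + 1)

instance (lines : List String) (start_idx : Int) : Decidable (Pre_parse_diff_block_py lines start_idx) := by
  unfold Pre_parse_diff_block_py; infer_instance

def pvWitness_parse_diff_block_py : List String × Int :=
  (["<<<<<<< SEARCH", "old", "=======", "new", ">>>>>>> REPLACE"], 0)

def Spec_parse_diff_block_py (lines : List String) (start_idx : Int) (out : List String × List String × Int) : Prop := out = parse_diff_block_py_alt lines start_idx
instance (lines : List String) (start_idx : Int) (out : List String × List String × Int) : Decidable (Spec_parse_diff_block_py lines start_idx out) := by unfold Spec_parse_diff_block_py; infer_instance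

-- ===== CLAIM (what is proved, stated in full; the proofs are below) =====
def Claim_equal_parse_diff_block_py : Prop := ∀ (lines : List String) (start_idx : Int), Dom_parse_diff_block_py lines start_idx → Pre_parse_diff_block_py lines start_idx → Spec_parse_diff_block_py lines start_idx (parse_diff_block_py lines start_idx)

-- ===== LEMMAS AND PROOFS =====

-- B's loop in the replace phase is A's second scan (plus A's trailing checks).
theorem pvLoopB_true (lines : List String) :
    ∀ (fuel : Nat) (i : Int) (accS accR : List String), (lines.length : Int) - i ≤ (fuel : Int) →
      pvLoopB lines i accS accR true =
        (match pvScanUntil? lines ">>>>>>> REPLACE" i accR with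
          | none => ([], [], 0)
          | some (rl, j) =>
            if (lines.length : Int) ≤ j then ([], [], 0) else (accS, rl, j)) := by
  intro fuel
  induction fuel with
  | zero =>
    intro i accS accR hle
    rw [pvLoopB, pvScanUntil?]
    rw [dif_neg (by push_cast at hle ⊢; omega), dif_neg (by push_cast at hle ⊢; omega)]
    simp only
    rw [if_pos (by push_cast at hle ⊢; omega)]
  | succ fuel ih =>
    intro i accS accR hle
    by_cases hi : i < (lines.length : Int)
    · rw [pvLoopB, pvScanUntil?, dif_pos hi, dif_pos hi]
      cases hg : PySem.List.pyGet? lines i with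
      | none => simp only
      | some line =>
        simp only
        by_cases hrep : line = ">>>>>>> REPLACE"
        · rw [if_neg (by simp), if_pos (by simp [hrep]), if_pos hrep]
          simp only
          rw [if_neg (by omega)]
        · rw [if_neg (by simp), if_neg (by simp [hrep]), if_pos trivial, if_neg hrep]
          exact ih (i + 1) accS (accR ++ [line]) (by omega)
    · rw [pvLoopB, pvScanUntil?, dif_neg hi, dif_neg hi]
      simp only
      rw [if_pos (by omega)]

-- B's loop in the search phase is A's first scan followed by the replace phase.
theorem pvLoopB_false (lines : List String) :
    ∀ (fuel : Nat) (i : Int) (accS accR : List String), (lines.length : Int) - i ≤ (fuel : Int) →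
      pvLoopB lines i accS accR false =
        (match pvScanUntil? lines "=======" i accS with
          | none => ([], [], 0)
          | some (sl, j) =>
            if (lines.length : Int) ≤ j then ([], [], 0)
            else pvLoopB lines (j + 1) sl accR true) := by
  intro fuel
  induction fuel with
  | zero =>
    intro i accS accR hle
    rw [pvLoopB, pvScanUntil?]
    rw [dif_neg (by push_cast at hle ⊢; omega), dif_neg (by push_cast at hle ⊢; omega)]
    simp only
    rw [if_pos (by push_cast at hle ⊢; omega)]
  | succ fuel ih =>
    intro i accS accR hle
    by_cases hi : i < (lines.length : Int)
    · rw [pvLoopB, pvScanUntil?, dif_pos hi, dif_pos hi]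
      cases hg : PySem.List.pyGet? lines i with
      | none => simp only
      | some line =>
        simp only
        by_cases hsep : line = "======="
        · rw [if_pos (by simp [hsep]), if_pos hsep]
          simp only
          rw [if_neg (by omega)]
        · rw [if_neg (by simp [hsep]), if_neg (by simp), if_neg (by simp), if_neg hsep]
          exact ih (i + 1) (accS ++ [line]) accR (by omega)
    · rw [pvLoopB, pvScanUntil?, dif_neg hi, dif_neg hi]
      simp only
      rw [if_pos (by omega)]

-- The two ports agree on every input (the claim only asserts it on Pre_).
theorem pvPorts_eq (lines : List String) (start_idx : Int) :
    parse_diff_block_py lines start_idx = parse_diff_block_py_alt lines start_idx := by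
  rw [parse_diff_block_py, parse_diff_block_py_alt]
  rw [pvLoopB_false lines ((lines.length : Int) - (start_idx + 1)).toNat (start_idx + 1) [] []
    (by omega)]
  cases h1 : pvScanUntil? lines "=======" (start_idx + 1) [] with
  | none => rfl
  | some p =>
    obtain ⟨sl, j⟩ := p
    simp only
    by_cases hj : (lines.length : Int) ≤ j
    · rw [if_pos hj, if_pos hj]
    · rw [if_neg hj, if_neg hj]
      rw [pvLoopB_true lines ((lines.length : Int) - (j + 1)).toNat (j + 1) sl [] (by omega)]

theorem parse_diff_block_py_spec : Claim_equal_parse_diff_block_py := by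
  intro lines start_idx _dom _pre
  exact pvPorts_eq lines start_idx
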